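-- pv_equiv track=rewrite | github.com/beoko/fundos_CVM | cvm_core.py | _get_cnpj_col
-- ===== SOURCE A (Python) =====
-- from typing import Set, List, Tuple, Optional
--
-- def _get_cnpj_col(columns: List[str]) -> Optional[str]:
--     cols = list(columns)
--     if "CNPJ_FUNDO_CLASSE" in cols:
--         return "CNPJ_FUNDO_CLASSE"
--     cnpj_candidates = [c for c in cols if "CNPJ" in c]
--     if not cnpj_candidates:
--         return None
--     classe_first = [c for c in cnpj_candidates if "CLASSE" in c]
--     return classe_first[0] if classe_first else cnpj_candidates[0]
-- ===== SOURCE B (Python) =====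
-- from typing import List, Optional
--
-- def _get_cnpj_col(columns: List[str]) -> Optional[str]:
--     def rank(c: str) -> int:
--         if "CNPJ" not in c:
--             return 3
--         if c == "CNPJ_FUNDO_CLASSE":
--             return 0
--         return 1 if "CLASSE" in c else 2
--     cand = [(rank(c), i) for i, c in enumerate(columns) if "CNPJ" in c]
--     best = min(cand, default=None)
--     return None if best is None else columns[best[1]]
-- ===== Notes on version B (the rewrite author's own statement) =====
-- stated objective: alternative
-- what changed: Replaced A's staged membership-test-plus-filter cascade by a score-and-select algorithm: each column is assigned a numeric priority rank (0 exact name, 1 CNPJ+CLASSE, 2 CNPJ, 3 other) and the answer is the column at the argmin of (rank, index) over the candidates, via a single min over scored pairs.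
import Mathlib
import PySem

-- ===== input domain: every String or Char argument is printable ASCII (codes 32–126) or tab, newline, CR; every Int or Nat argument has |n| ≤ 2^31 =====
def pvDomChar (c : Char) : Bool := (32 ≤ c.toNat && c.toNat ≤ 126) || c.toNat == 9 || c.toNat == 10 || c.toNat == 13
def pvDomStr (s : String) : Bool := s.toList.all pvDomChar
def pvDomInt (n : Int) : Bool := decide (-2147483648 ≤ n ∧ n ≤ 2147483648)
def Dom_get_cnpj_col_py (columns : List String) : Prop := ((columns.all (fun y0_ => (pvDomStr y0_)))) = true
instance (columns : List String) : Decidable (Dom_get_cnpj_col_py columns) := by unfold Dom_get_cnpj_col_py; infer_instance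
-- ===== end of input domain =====

-- B replaces A's staged membership-test/filter cascade by a score-and-select algorithm:
-- rank every column (0 exact, 1 CNPJ+CLASSE, 2 CNPJ, 3 other) and take the column at the
-- argmin of (rank, index) over candidates (objective: alternative).

-- ===== PORT A =====
def get_cnpj_col_py (columns : List String) : Option String :=
  let cols := columns
  if "CNPJ_FUNDO_CLASSE" ∈ cols then some "CNPJ_FUNDO_CLASSE"
  else
    let cnpj_candidates := cols.filter (fun c => PySem.Str.isIn "CNPJ" c)
    if cnpj_candidates = [] then none
    else
      let classe_first := cnpj_candidates.filter (fun c => PySem.Str.isIn "CLASSE" c)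
      match classe_first with
      | x :: _ => some x
      | [] =>
        match cnpj_candidates with
        | y :: _ => some y
        | [] => none   -- unreachable: cnpj_candidates ≠ []

-- ===== PORT B =====
-- B's inner 'rank' helper
def pvRank (c : String) : Int :=
  if ¬ PySem.Str.isIn "CNPJ" c then 3
  else if c = "CNPJ_FUNDO_CLASSE" then 0
  else if PySem.Str.isIn "CLASSE" c then 1 else 2

def get_cnpj_col_py_alt (columns : List String) : Option String :=
  let cand := (PySem.List.enumerate columns).filterMap
    (fun p => if PySem.Str.isIn "CNPJ" p.2 then some (pvRank p.2, p.1) else none)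
  match PySem.List.min2? cand (fun q => q.1) (fun q => q.2) with
  | none => none
  | some best => PySem.List.pyGet? columns best.2
  -- best.2 is an enumerate index of columns, so it is always in range and
  -- pyGet? returns `some`, exactly as Python's columns[best[1]] returns.

-- ===== PRECONDITION & SPEC =====
def Spec_get_cnpj_col_py (columns : List String) (out : Option String) : Prop := out = get_cnpj_col_py_alt columns
instance (columns : List String) (out : Option String) : Decidable (Spec_get_cnpj_col_py columns out) := by unfold Spec_get_cnpj_col_py; infer_instance

-- ===== CLAIM (what is proved, stated in full; the proofs are below) =====
def Claim_equal_get_cnpj_col_py : Prop := ∀ (columns : List String), Dom_get_cnpj_col_py columns → Spec_get_cnpj_col_py columns (get_cnpj_col_py columns)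

-- ===== LEMMAS AND PROOFS =====

-- proof-side spec of B's argmin: first element of minimal rank among CNPJ candidates,
-- as (rank, relative index, element)
def pvBestR : List String → Option (Int × Nat × String)
  | [] => none
  | c :: t =>
    let rest := (pvBestR t).map (fun x => (x.1, x.2.1 + 1, x.2.2))
    if PySem.Str.isIn "CNPJ" c then
      match rest with
      | none => some (pvRank c, 0, c)
      | some x => if x.1 < pvRank c then some x else some (pvRank c, 0, c)
    else rest

-- B's candidate list, with enumeration starting at n
def pvCand (l : List String) (n : Int) : List (Int × Int) :=
  (PySem.List.enumerate l n).filterMap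
    (fun p => if PySem.Str.isIn "CNPJ" p.2 then some (pvRank p.2, p.1) else none)

-- the fold step of min2? with these keys
def pvStep (acc : Option (Int × Int)) (x : Int × Int) : Option (Int × Int) :=
  match acc with
  | none => some x
  | some m => if (decide (x.1 < m.1) || !decide (m.1 < x.1) && decide (x.2 < m.2)) = true then some x else some m

theorem pvMin2_eq_foldl (xs : List (Int × Int)) :
    PySem.List.min2? xs (fun q => q.1) (fun q => q.2) = xs.foldl pvStep none := by
  unfold PySem.List.min2? pvStep
  congr 1
  funext acc x
  cases acc <;> rfl

theorem pvCand_nil (n : Int) : pvCand [] n = [] := rfl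

theorem pvCand_cons (c : String) (t : List String) (n : Int) :
    pvCand (c :: t) n =
      (if PySem.Str.isIn "CNPJ" c then [(pvRank c, n)] else []) ++ pvCand t (n + 1) := by
  simp only [pvCand, PySem.List.enumerate_cons, List.filterMap_cons]
  split_ifs with h <;> simp

theorem pvRank_nonneg (c : String) : 0 ≤ pvRank c := by
  unfold pvRank; split_ifs <;> omega

theorem pvIsIn_exact : PySem.Str.isIn "CNPJ" "CNPJ_FUNDO_CLASSE" = true := by decide

theorem pvRank_zero_iff (c : String) : pvRank c = 0 ↔ c = "CNPJ_FUNDO_CLASSE" := by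
  unfold pvRank
  split_ifs with h1 h2 h3 <;>
    constructor <;> intro h <;> first
      | rfl | omega | (subst h; exact absurd pvIsIn_exact h1) | (exact absurd h h2)

theorem pvRank_le_two (c : String) (h : PySem.Str.isIn "CNPJ" c = true) : pvRank c ≤ 2 := by
  unfold pvRank; split_ifs <;> simp_all

theorem pvRank_one_iff (c : String) :
    pvRank c = 1 ↔ (PySem.Str.isIn "CNPJ" c = true ∧ PySem.Str.isIn "CLASSE" c = true ∧ c ≠ "CNPJ_FUNDO_CLASSE") := by
  unfold pvRank
  split_ifs with h1 h2 h3 <;> simp_all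

theorem pvRank_exact : pvRank "CNPJ_FUNDO_CLASSE" = 0 := by decide

theorem pvRank_le_one (c : String) (h1 : PySem.Str.isIn "CNPJ" c = true)
    (h2 : PySem.Str.isIn "CLASSE" c = true) : pvRank c ≤ 1 := by
  unfold pvRank; split_ifs <;> simp_all

-- FC2: folding min2?'s step from a known accumulator whose index precedes all candidates
theorem pvFC2 (l : List String) : ∀ (n : Int) (a : Int × Int), a.2 < n →
    (pvCand l n).foldl pvStep (some a) =
      some (match pvBestR l with
            | none => a
            | some x => if x.1 < a.1 then (x.1, n + (x.2.1 : Int)) else a) := by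
  induction l with
  | nil => intro n a _; simp [pvCand_nil, pvBestR]
  | cons c t ih =>
    intro n a ha
    rw [pvCand_cons]
    by_cases hc : PySem.Str.isIn "CNPJ" c = true
    · simp only [hc, if_true, List.singleton_append, List.foldl_cons]
      have hstep : pvStep (some a) (pvRank c, n) =
          some (if pvRank c < a.1 then (pvRank c, n) else a) := by
        by_cases h1 : pvRank c < a.1 <;>
          simp [pvStep, h1, show ¬ n < a.2 by omega]
      rw [hstep]
      by_cases h1 : pvRank c < a.1
      · rw [if_pos h1, ih (n + 1) (pvRank c, n) (by show n < n + 1; omega)]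
        simp only [pvBestR, hc, if_true]
        cases hb : pvBestR t with
        | none => simp [h1]
        | some y =>
          simp only [Option.map_some]
          split_ifs <;> simp_all [Prod.ext_iff] <;> (try split_ifs <;> simp_all [Prod.ext_iff]) <;> (try push_cast) <;> omega
      · rw [if_neg h1, ih (n + 1) a (by omega)]
        simp only [pvBestR, hc, if_true]
        cases hb : pvBestR t with
        | none => simp [h1]
        | some y =>
          simp only [Option.map_some]
          split_ifs <;> simp_all [Prod.ext_iff] <;> (try split_ifs <;> simp_all [Prod.ext_iff]) <;> (try push_cast) <;> omega
    · simp only [hc, if_false, Bool.false_eq_true, List.nil_append]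
      rw [ih (n + 1) a (by omega)]
      simp only [pvBestR, hc, if_false, Bool.false_eq_true]
      cases hb : pvBestR t with
      | none => simp
      | some y =>
        simp only [Option.map_some]
        split_ifs <;> simp_all [Prod.ext_iff] <;> (try split_ifs <;> simp_all [Prod.ext_iff]) <;> (try push_cast) <;> omega

-- FC1: min2? over the candidates is pvBestR, with indices shifted by n
theorem pvFC1 (l : List String) : ∀ (n : Int),
    (pvCand l n).foldl pvStep none = (pvBestR l).map (fun x => (x.1, n + (x.2.1 : Int))) := by
  induction l with
  | nil => intro n; simp [pvCand_nil, pvBestR]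
  | cons c t ih =>
    intro n
    rw [pvCand_cons]
    by_cases hc : PySem.Str.isIn "CNPJ" c = true
    · simp only [hc, if_true, List.singleton_append, List.foldl_cons]
      have h0 : pvStep none (pvRank c, n) = some (pvRank c, n) := rfl
      rw [h0, pvFC2 t (n + 1) (pvRank c, n) (by show n < n + 1; omega)]
      simp only [pvBestR, hc, if_true]
      cases hb : pvBestR t with
      | none => simp
      | some y =>
        simp only [Option.map_some]
        split_ifs <;> simp_all [Prod.ext_iff] <;> (try split_ifs <;> simp_all [Prod.ext_iff]) <;> (try push_cast) <;> omega
    · simp only [hc, if_false, Bool.false_eq_true, List.nil_append]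
      rw [ih (n + 1)]
      simp only [pvBestR, hc, if_false, Bool.false_eq_true]
      cases hb : pvBestR t with
      | none => simp
      | some y =>
        simp only [Option.map_some]
        simp [Prod.ext_iff]
        push_cast
        ring

theorem pvBestR_props (l : List String) (x : Int × Nat × String) (h : pvBestR l = some x) :
    l[x.2.1]? = some x.2.2 ∧ pvRank x.2.2 = x.1 ∧ PySem.Str.isIn "CNPJ" x.2.2 = true := by
  induction l generalizing x with
  | nil => simp [pvBestR] at h
  | cons c t ih =>
    simp only [pvBestR] at h
    by_cases hc : PySem.Str.isIn "CNPJ" c = true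
    · rw [if_pos hc] at h
      cases hb : pvBestR t with
      | none => rw [hb] at h; simp at h; subst h; exact ⟨rfl, rfl, hc⟩
      | some y =>
        rw [hb] at h; simp only [Option.map_some] at h
        obtain ⟨hg, hr, hy⟩ := ih _ hb
        by_cases h2 : y.1 < pvRank c
        · rw [if_pos h2] at h; simp at h; subst h; simpa using ⟨hg, hr, hy⟩
        · rw [if_neg h2] at h; simp at h; subst h; exact ⟨rfl, rfl, hc⟩
    · rw [if_neg hc] at h
      cases hb : pvBestR t with
      | none => rw [hb] at h; simp at h
      | some y =>
        rw [hb] at h; simp only [Option.map_some, Option.some_inj] at h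
        obtain ⟨hg, hr, hy⟩ := ih _ hb
        subst h; simpa using ⟨hg, hr, hy⟩

theorem pvBestR_none_iff (l : List String) :
    pvBestR l = none ↔ l.filter (fun c => PySem.Str.isIn "CNPJ" c) = [] := by
  induction l with
  | nil => simp [pvBestR]
  | cons c t ih =>
    simp only [pvBestR, List.filter_cons]
    by_cases hc : PySem.Str.isIn "CNPJ" c = true
    · rw [if_pos hc, if_pos hc]
      cases pvBestR t with
      | none => simp
      | some y =>
        exact iff_of_false (by simp only [Option.map_some]; split_ifs <;> simp) (by simp)
    · rw [if_neg hc, if_neg hc]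
      simpa using ih

theorem pvBestR_min (l : List String) (x : Int × Nat × String) (h : pvBestR l = some x) :
    ∀ c ∈ l, PySem.Str.isIn "CNPJ" c = true → x.1 ≤ pvRank c := by
  induction l generalizing x with
  | nil => simp
  | cons c t ih =>
    intro c' hmem hin
    simp only [pvBestR] at h
    rcases List.mem_cons.1 hmem with he | ht
    · subst he
      rw [if_pos hin] at h
      cases hb : pvBestR t with
      | none => rw [hb] at h; simp at h; subst h; rfl
      | some y =>
        rw [hb] at h; simp only [Option.map_some] at h
        by_cases h2 : y.1 < pvRank c'
        · rw [if_pos h2] at h; simp at h; subst h; simpa using le_of_lt h2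
        · rw [if_neg h2] at h; simp at h; subst h; rfl
    · by_cases hc : PySem.Str.isIn "CNPJ" c = true
      · rw [if_pos hc] at h
        cases hb : pvBestR t with
        | none =>
          rw [hb] at h; simp at h; subst h
          -- c' ∈ t is a CNPJ candidate, so pvBestR t cannot be none
          exfalso
          have := (pvBestR_none_iff t).1 hb
          have : c' ∈ t.filter (fun c => PySem.Str.isIn "CNPJ" c) := List.mem_filter.2 ⟨ht, hin⟩
          simp_all
        | some y =>
          rw [hb] at h; simp only [Option.map_some] at h
          have hy := ih _ hb c' ht hin
          by_cases h2 : y.1 < pvRank c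
          · rw [if_pos h2] at h; simp at h; subst h; simpa using hy
          · rw [if_neg h2] at h; simp at h; subst h
            simp only []
            omega
      · rw [if_neg hc] at h
        cases hb : pvBestR t with
        | none => rw [hb] at h; simp at h
        | some y =>
          rw [hb] at h; simp only [Option.map_some, Option.some_inj] at h
          have hy := ih _ hb c' ht hin
          subst h; simpa using hy

theorem pvBestR_first (l : List String) (x : Int × Nat × String) (h : pvBestR l = some x) :
    ∀ k < x.2.1, ∀ c, l[k]? = some c → PySem.Str.isIn "CNPJ" c = true → x.1 < pvRank c := by
  induction l generalizing x with
  | nil => simp [pvBestR] at h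
  | cons c t ih =>
    intro k hk c' hget hin
    simp only [pvBestR] at h
    by_cases hc : PySem.Str.isIn "CNPJ" c = true
    · rw [if_pos hc] at h
      cases hb : pvBestR t with
      | none => rw [hb] at h; simp at h; subst h; simp at hk
      | some y =>
        rw [hb] at h; simp only [Option.map_some] at h
        by_cases h2 : y.1 < pvRank c
        · rw [if_pos h2] at h; simp at h; subst h
          cases k with
          | zero => simp at hget; subst hget; simpa using h2
          | succ k' =>
            simp only [List.getElem?_cons_succ] at hget
            exact ih _ hb k' (by simpa using hk) c' hget hin
        · rw [if_neg h2] at h; simp at h; subst h; simp at hk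
    · rw [if_neg hc] at h
      cases hb : pvBestR t with
      | none => rw [hb] at h; simp at h
      | some y =>
        rw [hb] at h; simp only [Option.map_some, Option.some_inj] at h
        subst h
        cases k with
        | zero => simp at hget; subst hget; simp_all
        | succ k' =>
          simp only [List.getElem?_cons_succ] at hget
          exact ih _ hb k' (by simpa using hk) c' hget hin

-- characterisation of B's chosen element in A's terms
theorem pvBestE (l : List String) :
    (pvBestR l).map (fun x => x.2.2) =
      (if "CNPJ_FUNDO_CLASSE" ∈ l then some "CNPJ_FUNDO_CLASSE"
       else match (l.filter (fun c => PySem.Str.isIn "CNPJ" c && PySem.Str.isIn "CLASSE" c)).head? with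
            | some x => some x
            | none => (l.filter (fun c => PySem.Str.isIn "CNPJ" c)).head?) := by
  by_cases hex : "CNPJ_FUNDO_CLASSE" ∈ l
  · rw [if_pos hex]
    cases hb : pvBestR l with
    | none =>
      exfalso
      have hf := (pvBestR_none_iff l).1 hb
      have hmm : "CNPJ_FUNDO_CLASSE" ∈ l.filter (fun c => PySem.Str.isIn "CNPJ" c) :=
        List.mem_filter.2 ⟨hex, pvIsIn_exact⟩
      rw [hf] at hmm
      exact absurd hmm List.not_mem_nil
    | some x =>
      obtain ⟨hg, hr, hcn⟩ := pvBestR_props l x hb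
      have hmin := pvBestR_min l x hb _ hex pvIsIn_exact
      rw [pvRank_exact] at hmin
      have h0 : x.1 = 0 := le_antisymm hmin (hr ▸ pvRank_nonneg x.2.2)
      have he : x.2.2 = "CNPJ_FUNDO_CLASSE" := (pvRank_zero_iff _).1 (hr.trans h0)
      simp [he]
  · rw [if_neg hex]
    cases hb : pvBestR l with
    | none =>
      have hf := (pvBestR_none_iff l).1 hb
      have hf2 : l.filter (fun c => PySem.Str.isIn "CNPJ" c && PySem.Str.isIn "CLASSE" c) = [] := by
        rw [List.filter_eq_nil_iff] at hf ⊢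
        intro a ha
        simp only [Bool.and_eq_true, not_and]
        intro hca _
        exact hf a ha hca
      rw [hf, hf2]
      simp
    | some x =>
      obtain ⟨hg, hr, hcn⟩ := pvBestR_props l x hb
      obtain ⟨hlt, hgel⟩ := List.getElem?_eq_some_iff.1 hg
      have hmem : x.2.2 ∈ l := by
        rw [← hgel]; exact List.getElem_mem hlt
      have hne : x.2.2 ≠ "CNPJ_FUNDO_CLASSE" := fun he => hex (he ▸ hmem)
      have h2 : x.1 ≤ 2 := hr ▸ pvRank_le_two _ hcn
      have h1le : 1 ≤ x.1 := by
        have h0 : x.1 ≠ 0 := fun h0 => hne ((pvRank_zero_iff _).1 (hr.trans h0))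
        have := hr ▸ pvRank_nonneg x.2.2
        omega
      have hfirst := pvBestR_first l x hb
      rcases (by omega : x.1 = 1 ∨ x.1 = 2) with hone | htwo
      · -- minimal rank 1: B picks the first CNPJ∧CLASSE column
        obtain ⟨hc1, hc2, _⟩ := (pvRank_one_iff x.2.2).1 (hr.trans hone)
        have hhd : (l.filter (fun c => PySem.Str.isIn "CNPJ" c && PySem.Str.isIn "CLASSE" c)).head?
            = some x.2.2 := by
          rw [List.head?_filter, List.find?_eq_some_iff_getElem]
          refine ⟨by simp only [Bool.and_eq_true]; exact ⟨hc1, hc2⟩, x.2.1, hlt, hgel, ?_⟩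
          intro j hj
          by_cases hcj : PySem.Str.isIn "CNPJ" l[j] = true
          · have := hfirst j (by omega) l[j] (by simp) hcj
            have := pvRank_le_one l[j]
            simp only [Bool.not_eq_eq_eq_not, Bool.not_true, Bool.and_eq_false_iff]
            by_cases hclj : PySem.Str.isIn "CLASSE" l[j] = true
            · exfalso
              have := pvRank_le_one l[j] hcj hclj
              omega
            · right; simpa using hclj
          · simp only [Bool.not_eq_eq_eq_not, Bool.not_true, Bool.and_eq_false_iff]
            left; simpa using hcj
        rw [hhd]
        simp
      · -- minimal rank 2: no CNPJ∧CLASSE column; B picks the first CNPJ column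
        have hmin := pvBestR_min l x hb
        have hf2 : l.filter (fun c => PySem.Str.isIn "CNPJ" c && PySem.Str.isIn "CLASSE" c) = [] := by
          rw [List.filter_eq_nil_iff]
          intro a ha
          simp only [Bool.and_eq_true, not_and]
          intro hca hcl
          have := hmin a ha hca
          have := pvRank_le_one a hca hcl
          omega
        rw [hf2]
        have hhd : (l.filter (fun c => PySem.Str.isIn "CNPJ" c)).head? = some x.2.2 := by
          rw [List.head?_filter, List.find?_eq_some_iff_getElem]
          refine ⟨hcn, x.2.1, hlt, hgel, ?_⟩
          intro j hj
          by_cases hcj : PySem.Str.isIn "CNPJ" l[j] = true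
          · exfalso
            have := hfirst j (by omega) l[j] (by simp) hcj
            have := pvRank_le_two l[j] hcj
            omega
          · simpa using hcj
        rw [hhd]
        simp

theorem get_cnpj_col_eq (columns : List String) :
    get_cnpj_col_py columns = get_cnpj_col_py_alt columns := by
  have hB : get_cnpj_col_py_alt columns = (pvBestR columns).map (fun x => x.2.2) := by
    show (match PySem.List.min2? (pvCand columns 0) (fun q => q.1) (fun q => q.2) with
          | none => none
          | some best => PySem.List.pyGet? columns best.2) = _
    rw [pvMin2_eq_foldl, pvFC1 columns 0]
    cases hb : pvBestR columns with
    | none => simp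
    | some x =>
      obtain ⟨hg, _, _⟩ := pvBestR_props columns x hb
      simp only [Option.map_some]
      show PySem.List.pyGet? columns (0 + (x.2.1 : Int)) = some x.2.2
      rw [zero_add, PySem.List.pyGet?_natCast]
      exact hg
  rw [hB, pvBestE]
  unfold get_cnpj_col_py
  dsimp only
  by_cases hex : "CNPJ_FUNDO_CLASSE" ∈ columns
  · simp [hex]
  · rw [if_neg hex, if_neg hex]
    have hff : (columns.filter (fun c => PySem.Str.isIn "CNPJ" c)).filter
          (fun c => PySem.Str.isIn "CLASSE" c)
        = columns.filter (fun c => PySem.Str.isIn "CNPJ" c && PySem.Str.isIn "CLASSE" c) := by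
      rw [List.filter_filter]
      exact List.filter_congr (fun a _ => Bool.and_comm _ _)
    rw [hff]
    cases hcc : columns.filter (fun c => PySem.Str.isIn "CNPJ" c) with
    | nil =>
      have hcf : columns.filter
          (fun c => PySem.Str.isIn "CNPJ" c && PySem.Str.isIn "CLASSE" c) = [] := by
        rw [List.filter_eq_nil_iff] at hcc ⊢
        intro a ha
        simp only [Bool.and_eq_true, not_and]
        intro hca _
        exact hcc a ha hca
      rw [if_pos rfl, hcf]
      simp
    | cons y t =>
      rw [if_neg (by simp)]
      cases hcf : columns.filter
          (fun c => PySem.Str.isIn "CNPJ" c && PySem.Str.isIn "CLASSE" c) with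
      | nil => simp
      | cons x l' => simp

-- ===== VERDICT (by name: the statement is the Claim_ definition above) =====
theorem get_cnpj_col_py_spec : Claim_equal_get_cnpj_col_py := by
  intro columns _
  exact (get_cnpj_col_eq columns).symm ▸ rfl
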